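-- pv_equiv track=rewrite | github.com/yuanjie279/V2XPlatoon | ECRA/utils.py | CounterConsecutiveNumber
-- ===== SOURCE A (Python) =====
-- def CounterConsecutiveNumber(Alist):
--     """Calculate consecutive failure sequences and total success count"""
--     if not Alist:
--         return [], 0
--
--     accum_0_list = []  # Store consecutive failure sequence lengths
--     accumulate_1 = 0  # Store total success count
--
--     # Calculate total success count
--     for val in Alist:
--         if val != 0:
--             accumulate_1 += 1
--             # accumulate_1_backup = accumulate_1
--
--     # Calculate consecutive failure sequences
--     current_run = 0
--
--     for i in range(len(Alist)):
--         if Alist[i] == 0: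
--             current_run += 1
--         elif current_run > 0:
--             accum_0_list.append(current_run)
--             current_run = 0
--
--     # Handle consecutive failures at the end of sequence
--     if current_run > 0:
--         accum_0_list.append(current_run)
--
--     return accum_0_list, accumulate_1
-- ===== SOURCE B (Python) =====
-- def CounterConsecutiveNumber(Alist):
--     """Single two-pointer pass over runs: one scan classifies each maximal run
--     as a failure run (append its length) or successes (add its length)."""
--     fails, succ = [], 0
--     i, n = 0, len(Alist)
--     while i < n:
--         k = (Alist[i] == 0)
--         j = i + 1
--         while j < n and (Alist[j] == 0) == k:
--             j += 1
--         if k: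
--             fails.append(j - i)
--         else:
--             succ += j - i
--         i = j
--     return fails, succ
-- ===== Notes on version B (the rewrite author's own statement) =====
-- stated objective: alternative
-- what changed: Replaced A's two separate passes (a success-count loop, then a consecutive-zero loop with a trailing flush) by one two-pointer scan that walks the list run by run and classifies each maximal run at once.
import Mathlib
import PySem

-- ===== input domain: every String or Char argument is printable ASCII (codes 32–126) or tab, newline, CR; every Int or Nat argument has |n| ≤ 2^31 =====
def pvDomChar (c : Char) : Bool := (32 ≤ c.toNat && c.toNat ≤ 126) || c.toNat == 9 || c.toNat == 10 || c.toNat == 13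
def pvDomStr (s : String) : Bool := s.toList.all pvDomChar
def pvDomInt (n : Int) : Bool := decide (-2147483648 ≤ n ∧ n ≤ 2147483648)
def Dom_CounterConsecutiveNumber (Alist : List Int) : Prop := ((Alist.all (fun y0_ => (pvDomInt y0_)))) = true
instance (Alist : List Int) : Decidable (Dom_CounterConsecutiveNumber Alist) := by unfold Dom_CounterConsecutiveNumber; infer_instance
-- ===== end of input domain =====

-- B replaces A's two passes (success count, then zero-run collection with a trailing flush)
-- by one two-pointer scan over maximal runs; same O(n) cost, different decomposition.

-- ===== PORT A =====
-- the state of A's second loop: (accum_0_list, current_run)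
def pvStep (s : List Int × Int) (v : Int) : List Int × Int :=
  if v = 0 then (s.1, s.2 + 1)
  else if s.2 > 0 then (s.1 ++ [s.2], 0) else s

def CounterConsecutiveNumber (Alist : List Int) : List Int × Int :=
  if Alist = [] then ([], 0)
  else
    let accumulate_1 := Alist.foldl (fun a v => if v ≠ 0 then a + 1 else a) (0 : Int)
    let r := Alist.foldl pvStep ([], 0)
    (if r.2 > 0 then r.1 ++ [r.2] else r.1, accumulate_1)

-- ===== PORT B =====
-- inner while: advance j while Alist[j] has the same key k (indices stay in range)
def pvScan (A : List Int) (k : Bool) (j : Nat) : Nat :=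
  if h : j < A.length ∧ decide (A.getD j 0 = 0) = k then pvScan A k (j + 1) else j
termination_by A.length - j
decreasing_by omega

theorem pvScan_ge (A : List Int) (k : Bool) (j : Nat) : j ≤ pvScan A k j := by
  fun_induction pvScan with
  | case1 j h ih => omega
  | case2 => omega

-- outer while over run starts
def pvOuter (A : List Int) (i : Nat) (fails : List Int) (succ : Int) : List Int × Int :=
  if h : i < A.length then
    let k := decide (A.getD i 0 = 0)
    let j := pvScan A k (i + 1)
    if k then pvOuter A j (fails ++ [(j : Int) - (i : Int)]) succ
    else pvOuter A j fails (succ + ((j : Int) - (i : Int)))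
  else (fails, succ)
termination_by A.length - i
decreasing_by
  · have := pvScan_ge A (decide (A.getD i 0 = 0)) (i + 1); omega
  · have := pvScan_ge A (decide (A.getD i 0 = 0)) (i + 1); omega

def CounterConsecutiveNumber_alt (Alist : List Int) : List Int × Int :=
  pvOuter Alist 0 [] 0

-- ===== PRECONDITION & SPEC =====
def Spec_CounterConsecutiveNumber (Alist : List Int) (out : List Int × Int) : Prop := out = CounterConsecutiveNumber_alt Alist
instance (Alist : List Int) (out : List Int × Int) : Decidable (Spec_CounterConsecutiveNumber Alist out) := by unfold Spec_CounterConsecutiveNumber; infer_instance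

-- ===== CLAIM (what is proved, stated in full; the proofs are below) =====
def Claim_equal_CounterConsecutiveNumber : Prop := ∀ (Alist : List Int), Dom_CounterConsecutiveNumber Alist → Spec_CounterConsecutiveNumber Alist (CounterConsecutiveNumber Alist)

-- ===== LEMMAS AND PROOFS =====

def pvPred (k : Bool) (v : Int) : Bool := decide (v = 0) == k

-- clean run-recursion both ports are reduced to
def pvG : List Int → List Int × Int
  | [] => ([], 0)
  | x :: xs =>
    let k := decide (x = 0)
    let run := xs.takeWhile (pvPred k)
    let rest := xs.dropWhile (pvPred k)
    let r := pvG rest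
    if k then ((1 + (run.length : Int)) :: r.1, r.2)
    else (r.1, r.2 + (1 + (run.length : Int)))
termination_by l => l.length
decreasing_by
  have := List.length_dropWhile_le (p := pvPred (decide (x = 0))) (l := xs)
  simpa using Nat.lt_succ_of_le this

def pvFlush (s : List Int × Int) : List Int := if s.2 > 0 then s.1 ++ [s.2] else s.1

theorem pvScan_eq (A : List Int) (k : Bool) (j : Nat) :
    pvScan A k j = j + ((A.drop j).takeWhile (pvPred k)).length := by
  fun_induction pvScan with
  | case1 j h ih =>
    obtain ⟨hj, hk⟩ := h
    have hd : A.drop j = A[j] :: A.drop (j + 1) := List.drop_eq_getElem_cons hj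
    have hg : A.getD j 0 = A[j] := List.getD_eq_getElem A 0 hj
    rw [hg] at hk
    have hp : pvPred k A[j] = true := by simp [pvPred, hk]
    rw [hd, List.takeWhile_cons, if_pos hp]
    simp only [ih, List.length_cons]
    omega
  | case2 j h =>
    by_cases hj : j < A.length
    · have hk : ¬ decide (A.getD j 0 = 0) = k := by tauto
      have hd : A.drop j = A[j] :: A.drop (j + 1) := List.drop_eq_getElem_cons hj
      have hg : A.getD j 0 = A[j] := List.getD_eq_getElem A 0 hj
      rw [hg] at hk
      have hp : pvPred k A[j] = false := by
        cases hdk : decide (A[j] = 0) <;> cases k <;> simp_all [pvPred]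
      rw [hd, List.takeWhile_cons, if_neg (by simp [hp])]
      simp
    · have : A.drop j = [] := List.drop_eq_nil_of_le (by omega)
      rw [this]
      simp

theorem dropWhile_eq_drop (p : Int → Bool) (l : List Int) :
    l.dropWhile p = l.drop (l.takeWhile p).length := by
  induction l with
  | nil => simp
  | cons x xs ih =>
    rw [List.dropWhile_cons, List.takeWhile_cons]
    cases h : p x <;> simp [ih]

theorem pvOuter_eq (A : List Int) (i : Nat) (fails : List Int) (succ : Int) :
    pvOuter A i fails succ = (fails ++ (pvG (A.drop i)).1, succ + (pvG (A.drop i)).2) := by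
  fun_induction pvOuter with
  | case3 i fails succ h =>
    have : A.drop i = [] := List.drop_eq_nil_of_le (by omega)
    simp [this, pvG]
  | case1 i fails succ h k j hk ih =>
    have hd : A.drop i = A[i] :: A.drop (i + 1) := List.drop_eq_getElem_cons h
    have hg : A.getD i 0 = A[i] := List.getD_eq_getElem A 0 h
    have hscan : j = (i + 1) + ((A.drop (i + 1)).takeWhile (pvPred k)).length := by
      simpa [j] using pvScan_eq A k (i + 1)
    have hrest : (A.drop (i + 1)).dropWhile (pvPred k) = A.drop j := by
      rw [dropWhile_eq_drop, List.drop_drop, hscan, Nat.add_comm]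
    have hG : pvG (A.drop i)
        = ((1 + (((A.drop (i + 1)).takeWhile (pvPred k)).length : Int)) :: (pvG (A.drop j)).1,
           (pvG (A.drop j)).2) := by
      rw [hd, pvG]
      have hkk : decide (A[i] = 0) = k := by rw [← hg]
      rw [hkk, hrest]
      have hktrue : k = true := hk
      rw [hktrue]
      simp
    have hlen : ((j : Int) - (i : Int))
        = 1 + (((A.drop (i + 1)).takeWhile (pvPred k)).length : Int) := by
      rw [hscan]; push_cast; ring
    rw [ih, hG, hlen]
    simp
  | case2 i fails succ h k j hk ih =>
    have hd : A.drop i = A[i] :: A.drop (i + 1) := List.drop_eq_getElem_cons h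
    have hg : A.getD i 0 = A[i] := List.getD_eq_getElem A 0 h
    have hscan : j = (i + 1) + ((A.drop (i + 1)).takeWhile (pvPred k)).length := by
      simpa [j] using pvScan_eq A k (i + 1)
    have hrest : (A.drop (i + 1)).dropWhile (pvPred k) = A.drop j := by
      rw [dropWhile_eq_drop, List.drop_drop, hscan, Nat.add_comm]
    have hG : pvG (A.drop i)
        = ((pvG (A.drop j)).1,
           (pvG (A.drop j)).2 + (1 + (((A.drop (i + 1)).takeWhile (pvPred k)).length : Int))) := by
      rw [hd, pvG]
      have hkk : decide (A[i] = 0) = k := by rw [← hg]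
      rw [hkk, hrest]
      have hkfalse : k = false := by simpa using hk
      rw [hkfalse]
      simp
    have hlen : ((j : Int) - (i : Int))
        = 1 + (((A.drop (i + 1)).takeWhile (pvPred k)).length : Int) := by
      rw [hscan]; push_cast; ring
    rw [ih, hG, hlen]
    simp only [Prod.mk.injEq]
    exact ⟨trivial, by ring⟩

-- A-side: accumulator lemma for the second loop + flush
theorem pvAccLem (m : List Int) (acc : List Int) (cur : Int) :
    pvFlush (m.foldl pvStep (acc, cur)) = acc ++ pvFlush (m.foldl pvStep ([], cur)) := by
  induction m generalizing acc cur with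
  | nil =>
    by_cases h : cur > 0 <;> simp [pvFlush, h]
  | cons v vs ih =>
    simp only [List.foldl_cons]
    by_cases hv : v = 0
    · simp only [pvStep, if_pos hv]; exact ih acc (cur + 1)
    · by_cases hc : cur > 0
      · simp only [pvStep, if_neg hv, if_pos hc]
        simp only [List.nil_append]
        rw [ih (acc ++ [cur]) 0, ih [cur] 0, List.append_assoc]
      · simp only [pvStep, if_neg hv, if_neg hc]
        exact ih acc cur

theorem pvCountGen (l : List Int) (n : Int) :
    l.foldl (fun a v => if v ≠ 0 then a + 1 else a) n
      = n + l.foldl (fun a v => if v ≠ 0 then a + 1 else a) 0 := by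
  induction l generalizing n with
  | nil => simp
  | cons v vs ih =>
    simp only [List.foldl_cons]
    by_cases hv : v = 0
    · rw [if_neg (not_not_intro hv), if_neg (not_not_intro hv)]
      exact ih n
    · rw [if_pos hv, if_pos hv, ih (n + 1), ih (0 + 1)]
      ring

theorem pvZeros (l : List Int) (hz : ∀ v ∈ l, v = 0) (acc : List Int) (cur : Int) :
    l.foldl pvStep (acc, cur) = (acc, cur + l.length) := by
  induction l generalizing cur with
  | nil => simp
  | cons v vs ih =>
    have hv : v = 0 := hz v (by simp)
    simp only [List.foldl_cons, pvStep, if_pos hv]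
    rw [ih (fun w hw => hz w (by simp [hw])) (cur + 1)]
    simp only [List.length_cons]
    congr 1
    push_cast
    ring

theorem pvZerosCount (l : List Int) (hz : ∀ v ∈ l, v = 0) (n : Int) :
    l.foldl (fun a v => if v ≠ 0 then a + 1 else a) n = n := by
  induction l generalizing n with
  | nil => simp
  | cons v vs ih =>
    have hv : v = 0 := hz v (by simp)
    simp only [List.foldl_cons, if_neg (not_not_intro hv)]
    exact ih (fun w hw => hz w (by simp [hw])) n

theorem pvNonzeros (l : List Int) (hz : ∀ v ∈ l, v ≠ 0) (acc : List Int) :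
    l.foldl pvStep (acc, 0) = (acc, 0) := by
  induction l with
  | nil => simp
  | cons v vs ih =>
    have hv : v ≠ 0 := hz v (by simp)
    simp only [List.foldl_cons, pvStep, if_neg hv]
    rw [if_neg (by omega)]
    exact ih (fun w hw => hz w (by simp [hw]))

theorem pvNonzerosCount (l : List Int) (hz : ∀ v ∈ l, v ≠ 0) (n : Int) :
    l.foldl (fun a v => if v ≠ 0 then a + 1 else a) n = n + l.length := by
  induction l generalizing n with
  | nil => simp
  | cons v vs ih =>
    have hv : v ≠ 0 := hz v (by simp)
    simp only [List.foldl_cons, if_pos hv]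
    rw [ih (fun w hw => hz w (by simp [hw])) (n + 1)]
    simp only [List.length_cons]
    push_cast
    ring

theorem pvMainAux : ∀ (n : Nat) (l : List Int), l.length ≤ n →
    pvFlush (l.foldl pvStep ([], 0)) = (pvG l).1 ∧
    l.foldl (fun a v => if v ≠ 0 then a + 1 else a) 0 = (pvG l).2 := by
  intro n
  induction n with
  | zero =>
    intro l hl
    have hnil : l = [] := List.eq_nil_of_length_eq_zero (by omega)
    subst hnil
    simp [pvFlush, pvG]
  | succ n ih =>
    intro l hl
    match l with
    | [] => simp [pvFlush, pvG]
    | x :: xs =>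
      have hsplit : x :: xs
          = (x :: xs.takeWhile (pvPred (decide (x = 0)))) ++ xs.dropWhile (pvPred (decide (x = 0))) := by
        simp [List.takeWhile_append_dropWhile]
      have hlenrest : (xs.dropWhile (pvPred (decide (x = 0)))).length ≤ n := by
        have := List.length_dropWhile_le (p := pvPred (decide (x = 0))) (l := xs)
        simp only [List.length_cons] at hl
        omega
      have IH := ih (xs.dropWhile (pvPred (decide (x = 0)))) hlenrest
      by_cases hx : x = 0
      · -- failure run: x and the whole takeWhile block are zeros
        have hk : decide (x = 0) = true := by simp [hx]
        have hz : ∀ v ∈ x :: xs.takeWhile (pvPred (decide (x = 0))), v = 0 := by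
          intro v hv
          rcases List.mem_cons.mp hv with hv | hv
          · rw [hv]; exact hx
          · have := List.mem_takeWhile_imp hv
            simp only [pvPred, hk] at this
            simpa using this
        have hG : pvG (x :: xs)
            = ((1 + ((xs.takeWhile (pvPred (decide (x = 0)))).length : Int))
                 :: (pvG (xs.dropWhile (pvPred (decide (x = 0))))).1,
               (pvG (xs.dropWhile (pvPred (decide (x = 0))))).2) := by
          rw [pvG, hk]
          simp
        have hpos : (0 : Int) + ((x :: xs.takeWhile (pvPred (decide (x = 0)))).length : Int) > 0 := by
          simp only [List.length_cons]
          push_cast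
          omega
        constructor
        · rw [hG]
          conv_lhs => rw [hsplit]
          rw [List.foldl_append, pvZeros _ hz [] 0]
          cases hr : xs.dropWhile (pvPred (decide (x = 0))) with
          | nil =>
            simp only [List.foldl_nil, pvFlush, if_pos hpos, pvG]
            simp only [List.length_cons]
            push_cast
            simp [add_comm]
          | cons y ys =>
            have hy : y ≠ 0 := by
              have h1 := List.head?_dropWhile_not (pvPred (decide (x = 0))) xs
              rw [hr] at h1
              simp only [List.head?_cons] at h1
              simp only [pvPred, hk] at h1
              simpa using h1
            have step1 : List.foldl pvStep ([], (0 : Int) + ((x :: xs.takeWhile (pvPred (decide (x = 0)))).length : Int)) (y :: ys)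
                = List.foldl pvStep ([(0 : Int) + ((x :: xs.takeWhile (pvPred (decide (x = 0)))).length : Int)], 0) ys := by
              simp only [List.foldl_cons, pvStep, if_neg hy, if_pos hpos]
              simp
            have step2 : List.foldl pvStep (([] : List Int), (0 : Int)) (y :: ys)
                = List.foldl pvStep ([], 0) ys := by
              simp only [List.foldl_cons, pvStep, if_neg hy]
              rw [if_neg (by omega)]
            rw [step1, pvAccLem ys _ 0]
            rw [hr] at IH
            rw [step2] at IH
            rw [IH.1]
            simp only [List.length_cons]
            push_cast
            simp [add_comm]
        · rw [hG]
          conv_lhs => rw [hsplit]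
          rw [List.foldl_append, pvZerosCount _ hz 0, IH.2]
      · -- success run: x and the whole takeWhile block are nonzero
        have hk : decide (x = 0) = false := by simp [hx]
        have hz : ∀ v ∈ x :: xs.takeWhile (pvPred (decide (x = 0))), v ≠ 0 := by
          intro v hv
          rcases List.mem_cons.mp hv with hv | hv
          · rw [hv]; exact hx
          · have := List.mem_takeWhile_imp hv
            simp only [pvPred, hk] at this
            simpa using this
        have hG : pvG (x :: xs)
            = ((pvG (xs.dropWhile (pvPred (decide (x = 0))))).1,
               (pvG (xs.dropWhile (pvPred (decide (x = 0))))).2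
                 + (1 + ((xs.takeWhile (pvPred (decide (x = 0)))).length : Int))) := by
          rw [pvG, hk]
          simp
        constructor
        · rw [hG]
          conv_lhs => rw [hsplit]
          rw [List.foldl_append, pvNonzeros _ hz [], IH.1]
        · rw [hG]
          conv_lhs => rw [hsplit]
          rw [List.foldl_append, pvNonzerosCount _ hz 0, pvCountGen, IH.2]
          simp only [List.length_cons]
          push_cast
          ring

-- ===== VERDICT (by name: the statement is the Claim_ definition above) =====
theorem CounterConsecutiveNumber_spec : Claim_equal_CounterConsecutiveNumber := by
  intro Alist _
  show CounterConsecutiveNumber Alist = CounterConsecutiveNumber_alt Alist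
  have halt : CounterConsecutiveNumber_alt Alist = pvG Alist := by
    unfold CounterConsecutiveNumber_alt
    rw [pvOuter_eq]
    simp
  rw [halt]
  unfold CounterConsecutiveNumber
  by_cases h : Alist = []
  · simp [h, pvG]
  · rw [if_neg h]
    have hm := pvMainAux Alist.length Alist le_rfl
    have h1 := hm.1
    have h2 := hm.2
    unfold pvFlush at h1
    exact Prod.ext (by simpa using h1) h2
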